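-- pv_equiv track=rewrite | github.com/ppcl2025/google-ads-manager | changelog_manager.py | format_changelog_for_prompt
-- ===== SOURCE A (Python) =====
-- def format_changelog_for_prompt(changelog_content):
--     """
--     Format changelog content for inclusion in Claude prompt.
--
--     Args:
--         changelog_content: Raw changelog text
--
--     Returns:
--         Formatted string for prompt, or empty string if no content
--     """
--     if not changelog_content or not changelog_content.strip():
--         return ""
--
--     # Limit to last 3 periods to avoid prompt bloat
--     lines = changelog_content.split('\n')
--     periods = []
--     current_period = []
--
--     for line in lines:
--         if line.startswith("=" * 80) or line.startswith("PERIOD:"):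
--             if current_period:
--                 periods.append('\n'.join(current_period))
--             current_period = [line]
--         else:
--             current_period.append(line)
--
--     if current_period:
--         periods.append('\n'.join(current_period))
--
--     # Take last 3 periods (most recent)
--     recent_periods = periods[:3] if len(periods) > 3 else periods
--
--     if not recent_periods:
--         return ""
--
--     formatted = "=== PREVIOUS CHANGES & CONTEXT ===\n\n"
--     formatted += "\n\n".join(recent_periods)
--     formatted += "\n\n=== END OF PREVIOUS CHANGES ===\n"
--
--     return formatted
-- ===== SOURCE B (Python) =====
-- def format_changelog_for_prompt(changelog_content):
--     """Same result as A, built by a cut-and-grab scan that stops after three periods."""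
--     if not changelog_content or not changelog_content.strip():
--         return ""
--     lines = changelog_content.split('\n')
--     periods = []
--     while lines and len(periods) < 3:
--         seg = [lines[0]]
--         lines = lines[1:]
--         while lines and not (lines[0].startswith("=" * 80) or lines[0].startswith("PERIOD:")):
--             seg.append(lines[0])
--             lines = lines[1:]
--         periods.append('\n'.join(seg))
--     return ("=== PREVIOUS CHANGES & CONTEXT ===\n\n"
--             + "\n\n".join(periods)
--             + "\n\n=== END OF PREVIOUS CHANGES ===\n")
-- ===== Notes on version B (the rewrite author's own statement) =====
-- stated objective: alternative
-- what changed: Replaces the flush-at-boundary accumulator (collect all periods, then slice off three) with a cut-and-grab scan that slices each period off the front of the line list and stops as soon as three periods are built.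
import Mathlib
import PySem

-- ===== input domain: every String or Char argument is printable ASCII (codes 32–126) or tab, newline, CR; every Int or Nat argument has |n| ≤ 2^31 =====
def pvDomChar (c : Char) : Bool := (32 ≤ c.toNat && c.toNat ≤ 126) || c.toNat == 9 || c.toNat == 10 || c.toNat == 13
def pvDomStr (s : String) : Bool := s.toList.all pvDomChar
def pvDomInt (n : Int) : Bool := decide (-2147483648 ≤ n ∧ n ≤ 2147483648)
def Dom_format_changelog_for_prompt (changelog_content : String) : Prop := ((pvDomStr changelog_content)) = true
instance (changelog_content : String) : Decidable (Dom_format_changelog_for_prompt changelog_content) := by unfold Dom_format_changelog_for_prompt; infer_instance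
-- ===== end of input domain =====

-- B replaces A's flush-at-boundary accumulator (build all periods, then slice) with a
-- cut-and-grab scan that slices one period at a time off the front and stops after three
-- (objective: alternative decomposition, same result).

-- ===== PORT A =====
-- "=" * 80
def pvEq80 : String := String.ofList (List.replicate 80 '=')

def format_changelog_for_prompt (changelog_content : String) : String :=
  if changelog_content = "" ∨ PySem.Str.strip changelog_content = "" then ""
  else
    let lines := (PySem.Str.split? changelog_content "\n").getD []   -- sep "\n" ≠ "": never none
    let st := lines.foldl (fun (acc : List String × List String) line =>
        if PySem.Str.startswith line pvEq80 || PySem.Str.startswith line "PERIOD:" then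
          ((if acc.2 ≠ [] then acc.1 ++ [PySem.Str.join "\n" acc.2] else acc.1), [line])
        else (acc.1, acc.2 ++ [line])) ([], [])
    let periods := if st.2 ≠ [] then st.1 ++ [PySem.Str.join "\n" st.2] else st.1
    let recent := if periods.length > 3 then periods.take 3 else periods
    if recent = [] then ""
    else "=== PREVIOUS CHANGES & CONTEXT ===\n\n" ++ PySem.Str.join "\n\n" recent
          ++ "\n\n=== END OF PREVIOUS CHANGES ===\n"

-- ===== PORT B =====
-- inner while of Source B: move lines into seg until the next boundary line (or the end)
def pvGrab (seg : List String) : List String → List String × List String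
  | [] => (seg, [])
  | l :: t =>
    if PySem.Str.startswith l pvEq80 || PySem.Str.startswith l "PERIOD:" then (seg, l :: t)
    else pvGrab (seg ++ [l]) t

-- outer while of Source B: k = 3 - len(periods) periods still wanted
def pvBuild : Nat → List String → List String
  | 0, _ => []
  | _ + 1, [] => []
  | k + 1, l :: t =>
    let p := pvGrab [l] t
    PySem.Str.join "\n" p.1 :: pvBuild k p.2

def format_changelog_for_prompt_alt (changelog_content : String) : String :=
  if changelog_content = "" ∨ PySem.Str.strip changelog_content = "" then ""
  else
    let periods := pvBuild 3 ((PySem.Str.split? changelog_content "\n").getD [])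
    "=== PREVIOUS CHANGES & CONTEXT ===\n\n" ++ PySem.Str.join "\n\n" periods
      ++ "\n\n=== END OF PREVIOUS CHANGES ===\n"

-- ===== PRECONDITION & SPEC =====
def Spec_format_changelog_for_prompt (changelog_content : String) (out : String) : Prop := out = format_changelog_for_prompt_alt changelog_content
instance (changelog_content : String) (out : String) : Decidable (Spec_format_changelog_for_prompt changelog_content out) := by unfold Spec_format_changelog_for_prompt; infer_instance

-- ===== CLAIM (what is proved, stated in full; the proofs are below) =====
def Claim_equal_format_changelog_for_prompt : Prop := ∀ (changelog_content : String), Dom_format_changelog_for_prompt changelog_content → Spec_format_changelog_for_prompt changelog_content (format_changelog_for_prompt changelog_content)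

-- ===== LEMMAS AND PROOFS =====

-- the list of periods A's accumulator loop produces, as a recursion on the lines
def pvChunks : List String → List String → List String
  | cur, [] => if cur = [] then [] else [PySem.Str.join "\n" cur]
  | cur, l :: t =>
    if PySem.Str.startswith l pvEq80 || PySem.Str.startswith l "PERIOD:" then
      (if cur = [] then pvChunks [l] t else PySem.Str.join "\n" cur :: pvChunks [l] t)
    else pvChunks (cur ++ [l]) t

theorem pvFoldlA (lines : List String) : ∀ (ps cur : List String),
    (let st := lines.foldl (fun (acc : List String × List String) line =>
        if PySem.Str.startswith line pvEq80 || PySem.Str.startswith line "PERIOD:" then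
          ((if acc.2 ≠ [] then acc.1 ++ [PySem.Str.join "\n" acc.2] else acc.1), [line])
        else (acc.1, acc.2 ++ [line])) (ps, cur)
     ; (if st.2 ≠ [] then st.1 ++ [PySem.Str.join "\n" st.2] else st.1)) = ps ++ pvChunks cur lines := by
  induction lines with
  | nil =>
    intro ps cur
    simp only [List.foldl_nil, pvChunks]
    by_cases h : cur = []
    · simp only [if_neg (not_not_intro h), if_pos h, List.append_nil]
    · simp only [if_pos h, if_neg h]
  | cons l t ih =>
    intro ps cur
    simp only [List.foldl_cons, pvChunks]
    by_cases hb : (PySem.Str.startswith l pvEq80 || PySem.Str.startswith l "PERIOD:") = true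
    · simp only [if_pos hb]
      by_cases hc : cur = []
      · simp only [if_neg (not_not_intro hc), if_pos hc]
        exact ih ps [l]
      · simp only [if_pos hc, if_neg hc]
        rw [ih (ps ++ [PySem.Str.join "\n" cur]) [l], List.append_assoc]
        rfl
    · simp only [if_neg hb]
      exact ih ps (cur ++ [l])

theorem pvChunks_grab : ∀ (rest cur : List String), cur ≠ [] →
    pvChunks cur rest = PySem.Str.join "\n" (pvGrab cur rest).1 :: pvChunks [] (pvGrab cur rest).2 := by
  intro rest
  induction rest with
  | nil => intro cur hc; simp [pvChunks, pvGrab, hc]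
  | cons l t ih =>
    intro cur hc
    by_cases hb : (PySem.Str.startswith l pvEq80 || PySem.Str.startswith l "PERIOD:") = true
    · have hgrab : pvGrab cur (l :: t) = (cur, l :: t) := by
        simp only [pvGrab, if_pos hb]
      have h1 : pvChunks cur (l :: t) = PySem.Str.join "\n" cur :: pvChunks [l] t := by
        simp only [pvChunks, if_pos hb, if_neg hc]
      have h2 : pvChunks [] (l :: t) = pvChunks [l] t := by
        simp only [pvChunks, if_pos hb, if_true]
      rw [hgrab, h1, h2]
    · have hgrab : pvGrab cur (l :: t) = pvGrab (cur ++ [l]) t := by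
        simp only [pvGrab, if_neg hb]
      have h1 : pvChunks cur (l :: t) = pvChunks (cur ++ [l]) t := by
        simp only [pvChunks, if_neg hb]
      rw [hgrab, h1, ih (cur ++ [l]) (by simp)]

theorem pvChunks_cons (l : String) (t : List String) :
    pvChunks [] (l :: t) = PySem.Str.join "\n" (pvGrab [l] t).1 :: pvChunks [] (pvGrab [l] t).2 := by
  have h1 : pvChunks [] (l :: t) = pvChunks [l] t := by
    simp only [pvChunks]
    by_cases hb : (PySem.Str.startswith l pvEq80 || PySem.Str.startswith l "PERIOD:") = true
    · simp only [if_pos hb, if_true]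
    · simp only [if_neg hb, List.nil_append]
  rw [h1, pvChunks_grab t [l] (by simp)]

theorem pvTake_chunks : ∀ (k : Nat) (lines : List String), (pvChunks [] lines).take k = pvBuild k lines := by
  intro k
  induction k with
  | zero => intro lines; simp [pvBuild]
  | succ k ih =>
    intro lines
    cases lines with
    | nil => simp [pvChunks, pvBuild]
    | cons l t => rw [pvChunks_cons]; simp [pvBuild, ih]

theorem pvGo_ne_nil (sep : List Char) : ∀ (fuel : Nat) (l cur : List Char) (acc : List (List Char)),
    PySem.Chars.splitOn.go sep fuel l cur acc ≠ [] := by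
  intro fuel
  induction fuel with
  | zero => intro l cur acc; simp [PySem.Chars.splitOn.go]
  | succ fuel ih =>
    intro l cur acc
    cases l with
    | nil => simp [PySem.Chars.splitOn.go]
    | cons c rest =>
      simp only [PySem.Chars.splitOn.go]
      by_cases hp : sep.isPrefixOf (c :: rest) = true <;> simp [hp, ih]

theorem pvSplit_ne_nil (s : String) : (PySem.Str.split? s "\n").getD [] ≠ [] := by
  simp only [PySem.Str.split?, PySem.Chars.split?, PySem.Chars.splitOn]
  simp [pvGo_ne_nil]

-- ===== VERDICT (by name: the statement is the Claim_ definition above) =====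
theorem format_changelog_for_prompt_spec : Claim_equal_format_changelog_for_prompt := by
  intro c _
  unfold Spec_format_changelog_for_prompt
  unfold format_changelog_for_prompt format_changelog_for_prompt_alt
  by_cases h : c = "" ∨ PySem.Str.strip c = ""
  · simp [h]
  · simp only [if_neg h]
    have hfold := pvFoldlA ((PySem.Str.split? c "\n").getD []) [] []
    simp only at hfold
    rw [hfold]
    simp only [List.nil_append]
    obtain ⟨l, t, hlt⟩ : ∃ l t, (PySem.Str.split? c "\n").getD [] = l :: t := by
      cases hE : (PySem.Str.split? c "\n").getD [] with
      | nil => exact absurd hE (pvSplit_ne_nil c)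
      | cons l t => exact ⟨l, t, rfl⟩
    rw [hlt]
    have hcons := pvChunks_cons l t
    have hrec : (if (pvChunks [] (l :: t)).length > 3 then (pvChunks [] (l :: t)).take 3 else pvChunks [] (l :: t)) = (pvChunks [] (l :: t)).take 3 := by
      split_ifs with h3
      · rfl
      · exact (List.take_of_length_le (by omega)).symm
    rw [hrec, pvTake_chunks 3 (l :: t)]
    have hne : pvBuild 3 (l :: t) ≠ [] := by
      rw [← pvTake_chunks 3 (l :: t), hcons]
      simp
    rw [if_neg hne]
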